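-- pv_equiv track=rewrite | github.com/Bancila-Alex/Python_UBB | Laboratory_1/SecondSet_6.py | determine_the_date
-- ===== SOURCE A (Python) =====
-- def determine_the_date(years, num, months):
--     while num:
--         for i in months:
--             if months[i] < num:
--                 num -= months[i]
--             else:
--                 return years, num, i
--         years += 1
-- ===== SOURCE B (Python) =====
-- def determine_the_date(years, num, months):
--     # Account for all completed calendar passes with one ceiling division,
--     # then locate the month by prefix sums in a single pass.
--     if num == 0:
--         return None
--     prefix = []
--     acc = 0
--     for v in months.values():
--         acc += v
--         prefix.append(acc)
--     total = acc
--     best = max(prefix)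
--     if num > best:
--         k = -((best - num) // total)  # ceil((num - best) / total) completed passes
--         years += k
--         num -= k * total
--     for (key, v), p in zip(months.items(), prefix):
--         if p >= num:
--             return years, num - (p - v), key
-- ===== Notes on version B (the rewrite author's own statement) =====
-- stated objective: alternative
-- what changed: A repeatedly subtracts month lengths pass after pass (one pass of the dict per year) until a month is not exceeded; B instead accounts for all completed calendar passes with a single ceiling division over the sum of the values, reduces num once, and locates the month with one prefix-sum scan.
import Mathlib
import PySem

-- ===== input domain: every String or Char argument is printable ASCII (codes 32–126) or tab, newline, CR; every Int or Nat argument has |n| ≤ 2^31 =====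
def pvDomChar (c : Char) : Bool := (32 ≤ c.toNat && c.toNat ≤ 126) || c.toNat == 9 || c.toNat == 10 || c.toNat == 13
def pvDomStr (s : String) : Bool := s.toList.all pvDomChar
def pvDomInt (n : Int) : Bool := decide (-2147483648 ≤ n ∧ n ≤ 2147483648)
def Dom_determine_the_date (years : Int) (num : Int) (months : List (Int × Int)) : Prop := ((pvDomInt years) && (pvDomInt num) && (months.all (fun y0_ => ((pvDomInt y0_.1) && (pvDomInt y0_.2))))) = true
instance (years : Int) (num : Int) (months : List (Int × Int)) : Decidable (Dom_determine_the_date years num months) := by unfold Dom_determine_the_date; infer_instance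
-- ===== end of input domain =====

-- B replaces A's pass-per-year subtraction loop with one ceiling division plus a single
-- prefix-sum scan (objective: alternative; the equivalence is about the return value).

-- ===== PORT A =====
-- one pass of A's inner  'for i in months: if months[i] < num: num -= months[i] else: return years, num, i'
-- (i ranges over the dict's keys, so months[i] never raises: getD is exact here)
def pvPassA (years : Int) (d : PySem.Dict Int Int) : Int → List Int → (Option (List Int)) ⊕ Int
  | num, [] => Sum.inr num
  | num, i :: rest =>
    if d.getD i 0 < num then pvPassA years d (num - d.getD i 0) rest
    else Sum.inl (some [years, num, i])

-- A's 'while num:' loop; it diverges on some inputs, so the port carries fuel.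
def pvLoopA (d : PySem.Dict Int Int) : Nat → Int → Int → Option (List Int)
  | 0, _, _ => none
  | fuel + 1, years, num =>
    if num = 0 then none
    else
      match pvPassA years d num d.keys with
      | Sum.inl r => r
      | Sum.inr num' => pvLoopA d fuel (years + 1) num'

-- fuel num.toNat + 1 is enough on every input Pre_ admits: each completed pass subtracts
-- the (≥ 1) sum of the values, so A performs at most num passes there.
def determine_the_date (years : Int) (num : Int) (months : List (Int × Int)) : Option (List Int) :=
  pvLoopA (PySem.Dict.ofList months) (num.toNat + 1) years num

-- ===== PORT B =====
-- B's final loop:  'for (key, v), p in zip(months.items(), prefix): if p >= num: return years, num - (p - v), key'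
def pvScanB (years num : Int) : List ((Int × Int) × Int) → Option (List Int)
  | [] => none
  | ((key, v), p) :: rest =>
    if num ≤ p then some [years, num - (p - v), key] else pvScanB years num rest

def determine_the_date_alt (years : Int) (num : Int) (months : List (Int × Int)) : Option (List Int) :=
  if num = 0 then none
  else
    let d := PySem.Dict.ofList months
    -- 'for v in months.values(): acc += v; prefix.append(acc)'
    let st := d.values.foldl (fun (st : List Int × Int) v => (st.1 ++ [st.2 + v], st.2 + v)) ([], 0)
    let pfx := st.1
    let total := st.2
    let best := (PySem.List.max? pfx (fun x => x)).getD 0   -- max(prefix) (nonempty under Pre_)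
    if best < num then
      let k := -(PySem.Int.floordiv (best - num) total)        -- ceil((num - best) / total)
      pvScanB (years + k) (num - k * total) (d.items.zip pfx)
    else
      pvScanB years num (d.items.zip pfx)

-- ===== PRECONDITION & SPEC =====
-- running prefix sums of the month lengths, starting from c
def pvPfx (c : Int) : List Int → List Int
  | [] => []
  | v :: rest => (c + v) :: pvPfx (c + v) rest

def pvTotal (months : List (Int × Int)) : Int := ((PySem.Dict.ofList months).values).sum
def pvBest (months : List (Int × Int)) : Int :=
  (PySem.List.max? (pvPfx 0 ((PySem.Dict.ofList months).values)) (fun x => x)).getD 0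

-- Pre_ excludes exactly the inputs on which A never returns (its 'while num:' loop runs forever):
-- A returns iff num == 0, or the dict is nonempty and (some prefix of its values already reaches num,
-- or the values sum to at least 1 so that each further pass strictly decreases num).
def Pre_determine_the_date (years : Int) (num : Int) (months : List (Int × Int)) : Prop :=
  num = 0 ∨ (months ≠ [] ∧ (num ≤ pvBest months ∨ 1 ≤ pvTotal months))
instance (years : Int) (num : Int) (months : List (Int × Int)) : Decidable (Pre_determine_the_date years num months) := by unfold Pre_determine_the_date; infer_instance

def pvWitness_determine_the_date : Int × Int × (List (Int × Int)) := (2000, 400, [(1, 31), (2, 28), (3, 31)])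

def Spec_determine_the_date (years : Int) (num : Int) (months : List (Int × Int)) (out : Option (List Int)) : Prop := out = determine_the_date_alt years num months
instance (years : Int) (num : Int) (months : List (Int × Int)) (out : Option (List Int)) : Decidable (Spec_determine_the_date years num months out) := by unfold Spec_determine_the_date; infer_instance

-- ===== CLAIM (what is proved, stated in full; the proofs are below) =====
def Claim_equal_determine_the_date : Prop := ∀ (years : Int) (num : Int) (months : List (Int × Int)), Dom_determine_the_date years num months → Pre_determine_the_date years num months → Spec_determine_the_date years num months (determine_the_date years num months)

-- ===== LEMMAS AND PROOFS =====

-- reference form of one pass of A, recursing over the dict's (key, value) items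
def pvRef (years : Int) : Int → List (Int × Int) → (Option (List Int)) ⊕ Int
  | n, [] => Sum.inr n
  | n, (k, v) :: rest => if v < n then pvRef years (n - v) rest else Sum.inl (some [years, n, k])

def pvRet (years n : Int) (items : List (Int × Int)) : Option (List Int) :=
  match pvRef years n items with
  | Sum.inl r => r
  | Sum.inr _ => none

-- number of completed passes B accounts for in one division
def pvK (best total n : Int) : Int := -(PySem.Int.floordiv (best - n) total)

-- A's pass over the keys is the reference pass over the items
lemma pvPassA_eq_pvRef (years : Int) (d : PySem.Dict Int Int)
    (items : List (Int × Int)) (h : ∀ p ∈ items, d.getD p.1 0 = p.2) (n : Int) :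
    pvPassA years d n (items.map (fun p => p.1)) = pvRef years n items := by
  induction items generalizing n with
  | nil => rfl
  | cons p rest ih =>
    obtain ⟨k, v⟩ := p
    have hk : d.getD k 0 = v := h (k, v) (List.mem_cons_self)
    simp only [List.map_cons, pvPassA, pvRef, hk]
    split_ifs with hlt
    · exact ih (fun q hq => h q (List.mem_cons_of_mem _ hq)) (n - v)
    · rfl

-- B's zip-scan computes the value of the reference pass
lemma pvScanB_eq_pvRet (years : Int) (items : List (Int × Int)) (c n : Int) :
    pvScanB years n (items.zip (pvPfx c (items.map (fun p => p.2)))) =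
      pvRet years (n - c) items := by
  induction items generalizing c with
  | nil => rfl
  | cons p rest ih =>
    obtain ⟨k, v⟩ := p
    simp only [List.map_cons, pvPfx, List.zip_cons_cons, pvScanB, pvRet, pvRef]
    by_cases hle : n ≤ c + v
    · have : ¬ v < n - c := by omega
      simp only [hle, if_true, this, if_false]
      have : n - (c + v - v) = n - c := by ring
      rw [this]
    · have hlt : v < n - c := by omega
      simp only [hle, if_false, hlt, if_true]
      have := ih (c + v)
      have harith : n - c - v = n - (c + v) := by ring
      rw [this, pvRet, harith]

-- B's fold builds the prefix sums and the total
lemma pvFold_eq (vs : List Int) (p0 : List Int) (c : Int) :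
    vs.foldl (fun (st : List Int × Int) v => (st.1 ++ [st.2 + v], st.2 + v)) (p0, c) =
      (p0 ++ pvPfx c vs, c + vs.sum) := by
  induction vs generalizing p0 c with
  | nil => simp [pvPfx]
  | cons v rest ih =>
    simp only [List.foldl_cons, pvPfx, List.sum_cons]
    rw [ih]
    simp [List.append_assoc]
    ring

-- if every prefix sum stays below n, the pass completes and subtracts the total
lemma pvRef_inr (years : Int) (items : List (Int × Int)) (c n : Int)
    (h : ∀ p ∈ pvPfx c (items.map (fun p => p.2)), p < n) :
    pvRef years (n - c) items = Sum.inr (n - c - (items.map (fun p => p.2)).sum) := by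
  induction items generalizing c with
  | nil => simp [pvRef]
  | cons p rest ih =>
    obtain ⟨k, v⟩ := p
    simp only [List.map_cons, pvPfx] at h ⊢
    have hv : c + v < n := h (c + v) (List.mem_cons_self)
    simp only [pvRef, List.sum_cons]
    have hlt : v < n - c := by omega
    simp only [hlt, if_true]
    have harith : n - c - v = n - (c + v) := by ring
    rw [harith, ih (c + v) (fun q hq => h q (List.mem_cons_of_mem _ hq))]
    congr 1
    ring

-- if some prefix sum reaches n, the pass returns
lemma pvRef_inl (years : Int) (items : List (Int × Int)) (c n : Int)
    (h : ∃ p ∈ pvPfx c (items.map (fun p => p.2)), n ≤ p) :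
    ∃ r, pvRef years (n - c) items = Sum.inl r := by
  induction items generalizing c with
  | nil => simp [pvPfx] at h
  | cons p rest ih =>
    obtain ⟨k, v⟩ := p
    simp only [List.map_cons, pvPfx] at h
    simp only [pvRef]
    by_cases hlt : v < n - c
    · simp only [hlt, if_true]
      have harith : n - c - v = n - (c + v) := by ring
      rw [harith]
      apply ih (c + v)
      rcases h with ⟨q, hq, hnq⟩
      rcases List.mem_cons.mp hq with rfl | hq'
      · omega
      · exact ⟨q, hq', hnq⟩
    · simp only [hlt, if_false]
      exact ⟨some [years, n - c, k], rfl⟩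

-- the total is one of the prefix sums
lemma pvTotal_mem_pvPfx (vs : List Int) (c : Int) (h : vs ≠ []) :
    (c + vs.sum) ∈ pvPfx c vs := by
  induction vs generalizing c with
  | nil => exact absurd rfl h
  | cons v rest ih =>
    simp only [pvPfx, List.sum_cons]
    rcases eq_or_ne rest [] with rfl | hne
    · simp [pvPfx]
    · have := ih (c + v) hne
      have harith : c + (v + rest.sum) = c + v + rest.sum := by ring
      rw [harith]
      exact List.mem_cons_of_mem _ this

lemma fold_some (f : Option Int → Int → Option Int) (hf : ∀ a x, ∃ b, f (some a) x = some b)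
    (ys : List Int) : ∀ a, ∃ m, ys.foldl f (some a) = some m := by
  induction ys with
  | nil => exact fun a => ⟨a, rfl⟩
  | cons y ys ih =>
    intro a
    obtain ⟨b, hb⟩ := hf a y
    simp only [List.foldl_cons, hb]
    exact ih b

lemma pvMax?_isSome (xs : List Int) (h : xs ≠ []) :
    ∃ m, PySem.List.max? xs (fun x => x) = some m := by
  cases xs with
  | nil => exact absurd rfl h
  | cons x xs =>
    simp only [PySem.List.max?, List.foldl_cons]
    apply fold_some
    intro a x'
    show ∃ b, (if a < x' then some x' else some a) = some b
    split_ifs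
    · exact ⟨x', rfl⟩
    · exact ⟨a, rfl⟩

lemma insert_items_ne_nil (d : PySem.Dict Int Int) (k v : Int) :
    (d.insert k v).items ≠ [] := by
  by_cases hc : d.contains k = true
  · have hk : k ∈ d.keys := (PySem.Dict.contains_iff_mem_keys d k).mp hc
    have hd : d.items ≠ [] := by
      intro hnil
      simp [PySem.Dict.keys, hnil] at hk
    simp [PySem.Dict.insert, hc]
    exact hd
  · simp [PySem.Dict.insert, hc]

lemma update_items_ne_nil (l : List (Int × Int)) (d : PySem.Dict Int Int) (h : d.items ≠ []) :
    (PySem.Dict.update d l).items ≠ [] := by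
  induction l generalizing d with
  | nil => exact h
  | cons p rest ih =>
    simp only [PySem.Dict.update, List.foldl_cons]
    exact ih (d.insert p.1 p.2) (insert_items_ne_nil d p.1 p.2)

lemma pvOfList_items_ne_nil (months : List (Int × Int)) (h : months ≠ []) :
    (PySem.Dict.ofList months).items ≠ [] := by
  cases months with
  | nil => exact absurd rfl h
  | cons p rest =>
    simp only [PySem.Dict.ofList, PySem.Dict.update, List.foldl_cons]
    exact update_items_ne_nil rest _ (insert_items_ne_nil _ p.1 p.2)

-- the dict's items have the getD property
lemma pvGetD_items (d : PySem.Dict Int Int) (hnd : d.keys.Nodup) :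
    ∀ p ∈ d.items, d.getD p.1 0 = p.2 := by
  intro p hp
  obtain ⟨k, v⟩ := p
  exact PySem.Dict.getD_of_mem_items d hp hnd 0

-- the prefix-sum list of a nonempty list is nonempty
lemma pvPfx_ne_nil (vs : List Int) (c : Int) (h : vs ≠ []) : pvPfx c vs ≠ [] := by
  cases vs with
  | nil => exact absurd rfl h
  | cons v rest => simp [pvPfx]

-- core induction: with positive total, A's fueled loop equals B's closed form
lemma pvLoopA_eq (d : PySem.Dict Int Int) (hnd : d.keys.Nodup) (hne : d.items ≠ [])
    (fuel : Nat) (years n : Int)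
    (hT : 1 ≤ (d.values).sum)
    (hn : 0 < n) (hf : n.toNat ≤ fuel) :
    pvLoopA d (fuel + 1) years n =
      (if (PySem.List.max? (pvPfx 0 d.values) (fun x => x)).getD 0 < n then
        pvRet (years + pvK ((PySem.List.max? (pvPfx 0 d.values) (fun x => x)).getD 0) (d.values).sum n)
              (n - pvK ((PySem.List.max? (pvPfx 0 d.values) (fun x => x)).getD 0) (d.values).sum n * (d.values).sum)
              d.items
      else pvRet years n d.items) := by
  have hvne : d.values ≠ [] := by
    intro hv
    exact hne (by simpa [PySem.Dict.values, List.map_eq_nil_iff] using hv)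
  obtain ⟨best, hbest⟩ := pvMax?_isSome (pvPfx 0 d.values) (pvPfx_ne_nil d.values 0 hvne)
  have hmax : ∀ p ∈ pvPfx 0 d.values, p ≤ best := by
    intro p hp
    exact PySem.List.max?_isMax hbest p hp
  have hmem : best ∈ pvPfx 0 d.values := PySem.List.max?_mem hbest
  have hTmem : (0 + (d.values).sum) ∈ pvPfx 0 d.values := pvTotal_mem_pvPfx d.values 0 hvne
  have hTbest : (d.values).sum ≤ best := by have := hmax _ hTmem; omega
  rw [hbest]
  simp only [Option.getD_some]
  induction fuel generalizing years n with
  | zero => omega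
  | succ f ih =>
    conv_lhs => rw [pvLoopA]
    rw [if_neg (by omega : ¬ n = 0)]
    have hpass : pvPassA years d n d.keys = pvRef years n d.items :=
      pvPassA_eq_pvRef years d d.items (pvGetD_items d hnd) n
    by_cases hcase : best < n
    · have hall : ∀ p ∈ pvPfx 0 d.values, p < n := fun p hp => lt_of_le_of_lt (hmax p hp) hcase
      have hinr : pvRef years n d.items = Sum.inr (n - (d.values).sum) := by
        have := pvRef_inr years d.items 0 n hall
        simpa using this
      rw [hpass, hinr]
      show pvLoopA d (f + 1) (years + 1) (n - (d.values).sum) = _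
      have h1 : 0 < n - (d.values).sum := by omega
      have h2 : (n - (d.values).sum).toNat ≤ f := by omega
      rw [ih (years + 1) (n - (d.values).sum) h1 h2]
      set T := (d.values).sum with hTdef
      have hk_def : ∀ m : Int, pvK best T m = -PySem.Int.floordiv (-(m - best)) T := by
        intro m
        rw [pvK]
        congr 1
        congr 1
        ring
      by_cases hc2 : best < n - T
      · rw [if_pos hc2, if_pos hcase]
        set k' := pvK best T (n - T) with hk'def
        have hbr : (k' - 1) * T < (n - T) - best ∧ (n - T) - best ≤ k' * T := by
          apply (PySem.Int.neg_floordiv_neg_eq_iff_of_pos (by omega)).mp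
          rw [← hk_def (n - T)]
        have hk : pvK best T n = k' + 1 := by
          rw [hk_def n]
          apply (PySem.Int.neg_floordiv_neg_eq_iff_of_pos (by omega)).mpr
          constructor
          · have e : (k' + 1 - 1) * T = (k' - 1) * T + T := by ring
            rw [e]; linarith [hbr.1]
          · have e : (k' + 1) * T = k' * T + T := by ring
            rw [e]; linarith [hbr.2]
        rw [hk]
        congr 1
        · ring
        · ring
      · rw [if_neg hc2, if_pos hcase]
        have hk : pvK best T n = 1 := by
          rw [hk_def n]
          apply (PySem.Int.neg_floordiv_neg_eq_iff_of_pos (by omega)).mpr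
          constructor
          · have e : ((1 : Int) - 1) * T = 0 := by ring
            rw [e]; omega
          · have e : (1 : Int) * T = T := by ring
            rw [e]; omega
        rw [hk]
        congr 1
        ring
    · rw [if_neg hcase]
      obtain ⟨r, hr⟩ : ∃ r, pvRef years n d.items = Sum.inl r := by
        have := pvRef_inl years d.items 0 n ⟨best, hmem, by omega⟩
        simpa using this
      rw [hpass, hr]
      simp [pvRet, hr]

-- ===== VERDICT (by name: the statement is the Claim_ definition above) =====
theorem determine_the_date_spec : Claim_equal_determine_the_date := by
  intro years num months _hdom hpre
  unfold Spec_determine_the_date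
  by_cases h0 : num = 0
  · subst h0
    simp [determine_the_date, determine_the_date_alt, pvLoopA]
  · rcases hpre with h0' | ⟨hmne, hcase⟩
    · exact absurd h0' h0
    have hnd := PySem.Dict.nodup_keys_ofList months
    have hne := pvOfList_items_ne_nil months hmne
    set d := PySem.Dict.ofList months with hd
    have hvne : d.values ≠ [] := by
      intro hv
      exact hne (by simpa [PySem.Dict.values, List.map_eq_nil_iff] using hv)
    obtain ⟨best, hbest⟩ := pvMax?_isSome (pvPfx 0 d.values) (pvPfx_ne_nil d.values 0 hvne)
    have hmax : ∀ p ∈ pvPfx 0 d.values, p ≤ best := fun p hp => PySem.List.max?_isMax hbest p hp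
    have hmem : best ∈ pvPfx 0 d.values := PySem.List.max?_mem hbest
    have hTmem := pvTotal_mem_pvPfx d.values 0 hvne
    have hTbest : d.values.sum ≤ best := by have := hmax _ hTmem; omega
    have hBest : pvBest months = best := by
      rw [pvBest, ← hd, hbest]
      rfl
    have hTot : pvTotal months = d.values.sum := by
      rw [pvTotal, ← hd]
    have halt : determine_the_date_alt years num months =
        (if best < num then
           pvScanB (years + pvK best d.values.sum num)
             (num - pvK best d.values.sum num * d.values.sum) (d.items.zip (pvPfx 0 d.values))
         else pvScanB years num (d.items.zip (pvPfx 0 d.values))) := by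
      simp only [determine_the_date_alt, if_neg h0, ← hd]
      rw [pvFold_eq]
      simp only [List.nil_append, zero_add, hbest, Option.getD_some, pvK]
    have hscan : ∀ y m : Int, pvScanB y m (d.items.zip (pvPfx 0 d.values)) = pvRet y m d.items := by
      intro y m
      have := pvScanB_eq_pvRet y d.items 0 m
      simpa [PySem.Dict.values] using this
    rw [halt]
    unfold determine_the_date
    rw [← hd]
    by_cases hc : best < num
    · have hT : 1 ≤ d.values.sum := by
        rcases hcase with hle | hT
        · rw [hBest] at hle; omega
        · rw [hTot] at hT; exact hT
      have hn0 : 0 < num := by omega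
      have hmain := pvLoopA_eq d hnd hne num.toNat years num hT hn0 le_rfl
      rw [hbest] at hmain
      simp only [Option.getD_some] at hmain
      rw [hmain, if_pos hc, if_pos hc, hscan]
    · rw [if_neg hc]
      conv_lhs => rw [pvLoopA]
      rw [if_neg h0]
      have hpass : pvPassA years d num d.keys = pvRef years num d.items :=
        pvPassA_eq_pvRef years d d.items (pvGetD_items d hnd) num
      obtain ⟨r, hr⟩ : ∃ r, pvRef years num d.items = Sum.inl r := by
        have := pvRef_inl years d.items 0 num ⟨best, hmem, by omega⟩
        simpa using this
      rw [hpass, hr, hscan]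
      simp [pvRet, hr]
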